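-- pv_equiv track=rewrite | github.com/tzookb/programming-challenges | exercises/leetcode/wildcard-matching/sol.py | removeDupStars
-- ===== SOURCE A (Python) =====
-- def removeDupStars(pattern):
--     cleaned = [-1]
--     for c in pattern:
--         prev = cleaned[-1]
--         if c == "*" and prev == "*":
--             continue
--         cleaned.append(c)
--
--     return "".join(cleaned[1:])
-- ===== SOURCE B (Python) =====
-- def removeDupStars(pattern):
--     out = []
--     i, n = 0, len(pattern)
--     while i < n:
--         j = i
--         while j < n and pattern[j] == pattern[i]:
--             j += 1
--         out.append('*' if pattern[i] == '*' else pattern[i:j])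
--         i = j
--     return ''.join(out)
-- ===== Notes on version B (the rewrite author's own statement) =====
-- stated objective: alternative
-- what changed: B walks the string run by run with two indices (a hand-rolled groupby), emitting each maximal run whole ('*' runs collapsed to one star), instead of A's per-character loop that looks back at the last appended element of an accumulator with a -1 sentinel.
import Mathlib
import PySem

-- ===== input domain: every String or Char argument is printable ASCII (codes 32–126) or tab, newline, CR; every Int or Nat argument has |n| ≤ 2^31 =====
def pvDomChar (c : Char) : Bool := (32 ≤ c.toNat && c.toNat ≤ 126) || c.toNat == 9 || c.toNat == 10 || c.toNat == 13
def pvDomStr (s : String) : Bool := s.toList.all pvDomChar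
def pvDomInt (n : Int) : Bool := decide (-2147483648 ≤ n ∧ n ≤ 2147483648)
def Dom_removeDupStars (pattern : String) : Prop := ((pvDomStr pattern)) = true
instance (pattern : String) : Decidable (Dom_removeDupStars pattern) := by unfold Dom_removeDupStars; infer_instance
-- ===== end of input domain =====

-- B rewrites A's per-character look-back accumulator as a run-by-run scan (hand-rolled
-- groupby): same output, alternative structure; no speed claim.
-- ===== PORT A =====
-- Port of A: the accumulator starts as Python's [-1] sentinel; here we start from [] and
-- model cleaned[-1] by getLast? (the sentinel -1 never equals '*', exactly like none).
def removeDupStars (pattern : String) : String :=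
  let cleaned := pattern.toList.foldl
    (fun cleaned c =>
      let prev := cleaned.getLast?
      if c = '*' ∧ prev = some '*' then cleaned else cleaned ++ [c]) []
  String.ofList cleaned

-- ===== PORT B =====
-- B's inner while loop (advance j over the run of pattern[i]) is List.span with (· == c);
-- the outer while loop is this recursion over the remainder.
def altRuns (l : List Char) : List Char :=
  match l with
  | [] => []
  | c :: cs =>
    let p := cs.span (fun x => x == c)
    (if c = '*' then ['*'] else c :: p.1) ++ altRuns p.2
termination_by l.length
decreasing_by
  simp [List.span_eq_takeWhile_dropWhile]
  have := List.length_dropWhile_le (fun x => x == c) cs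
  omega

def removeDupStars_alt (pattern : String) : String :=
  String.ofList (altRuns pattern.toList)

-- ===== PRECONDITION & SPEC =====
def Spec_removeDupStars (pattern : String) (out : String) : Prop := out = removeDupStars_alt pattern
instance (pattern : String) (out : String) : Decidable (Spec_removeDupStars pattern out) := by unfold Spec_removeDupStars; infer_instance

-- ===== CLAIM (what is proved, stated in full; the proofs are below) =====
def Claim_equal_removeDupStars : Prop := ∀ (pattern : String), Dom_removeDupStars pattern → Spec_removeDupStars pattern (removeDupStars pattern)

-- ===== LEMMAS AND PROOFS =====

-- g b l: the common specification — the dedup-stars result of l given that the previously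
-- kept character was a star iff b.
def g (b : Bool) : List Char → List Char
  | [] => []
  | c :: cs => if c = '*' ∧ b = true then g b cs else c :: g (decide (c = '*')) cs

theorem foldl_g (l acc : List Char) :
    List.foldl
      (fun cleaned c =>
        let prev := cleaned.getLast?
        if c = '*' ∧ prev = some '*' then cleaned else cleaned ++ [c]) acc l
      = acc ++ g (decide (acc.getLast? = some '*')) l := by
  induction l generalizing acc with
  | nil => simp [g]
  | cons c cs ih =>
    simp only [List.foldl]
    by_cases h : c = '*' ∧ acc.getLast? = some '*'
    · rw [if_pos h, ih acc]
      have hb : decide (acc.getLast? = some '*') = true := by simp [h.2]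
      rw [hb, show g true (c :: cs) = g true cs from by simp [g, h.1]]
    · rw [if_neg h, ih (acc ++ [c])]
      have hl : (acc ++ [c]).getLast? = some c := by simp
      rw [hl]
      have hg : g (decide (acc.getLast? = some '*')) (c :: cs)
          = c :: g (decide (c = '*')) cs := by
        rcases not_and_or.mp h with h1 | h2
        · simp [g, h1]
        · by_cases hc : c = '*'
          · simp [g, hc, h2]
          · simp [g, hc]
      rw [hg, show (decide (some c = some '*')) = (decide (c = '*')) from by simp]
      simp

theorem g_skip_stars (d : List Char) :
    ∀ t : List Char, (∀ x ∈ t, x = '*') → g true (t ++ d) = g true d := by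
  intro t ht
  induction t with
  | nil => rfl
  | cons x xs ih =>
    have hx : x = '*' := ht x (by simp)
    simp only [List.cons_append, g, hx]
    simp
    exact ih (fun y hy => ht y (by simp [hy]))

theorem g_head_ne (d : List Char) (h : d.head? ≠ some '*') : g true d = g false d := by
  cases d with
  | nil => rfl
  | cons c cs =>
    have : c ≠ '*' := by simpa using h
    simp [g, this]

theorem g_run_plain (d : List Char) (c : Char) (hc : c ≠ '*') :
    ∀ t : List Char, (∀ x ∈ t, x = c) → g false (t ++ d) = t ++ g false d := by
  intro t ht
  induction t with
  | nil => rfl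
  | cons x xs ih =>
    have hx : x = c := ht x (by simp)
    have : x ≠ '*' := hx ▸ hc
    simp only [List.cons_append, g, this]
    simp
    exact ih (fun y hy => ht y (by simp [hy]))

theorem altRuns_g : ∀ (n : ℕ) (l : List Char), l.length ≤ n → altRuns l = g false l := by
  intro n
  induction n with
  | zero =>
    intro l hl
    have : l = [] := List.length_eq_zero_iff.mp (Nat.le_zero.mp hl)
    subst this; rw [altRuns.eq_def]; rfl
  | succ n ih =>
    intro l hl
    cases l with
    | nil => rw [altRuns.eq_def]; rfl
    | cons c cs =>
      have hsplit : cs.takeWhile (fun x => x == c) ++ cs.dropWhile (fun x => x == c) = cs :=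
        List.takeWhile_append_dropWhile
      have hlen : (cs.dropWhile (fun x => x == c)).length ≤ n := by
        have := List.length_dropWhile_le (fun x => x == c) cs
        simp at hl; omega
      have hmem : ∀ x ∈ cs.takeWhile (fun x => x == c), x = c := by
        intro x hx
        simpa using List.mem_takeWhile_imp hx
      have hhead : (cs.dropWhile (fun x => x == c)).head? ≠ some c := by
        intro hcontra
        cases hd : cs.dropWhile (fun x => x == c) with
        | nil => simp [hd] at hcontra
        | cons y ys =>
          have : ¬ (y == c) = true := by
            have := List.head?_dropWhile_not (fun x => x == c) cs
            simp [hd] at this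
            simpa using this
          simp [hd] at hcontra
          exact this (by simp [hcontra])
      rw [altRuns.eq_def]
      simp only [List.span_eq_takeWhile_dropWhile]
      rw [ih _ hlen]
      by_cases hc : c = '*'
      · subst hc
        rw [show g false ('*' :: cs) = '*' :: g true cs by simp [g]]
        conv_rhs => rw [← hsplit]
        rw [g_skip_stars _ _ hmem, g_head_ne _ hhead]
        simp
      · rw [show g false (c :: cs) = c :: g false cs by simp [g, hc]]
        conv_rhs => rw [← hsplit]
        rw [g_run_plain _ c hc _ hmem]
        simp [hc]

-- ===== VERDICT (by name: the statement is the Claim_ definition above) =====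
theorem removeDupStars_spec : Claim_equal_removeDupStars := by
  intro pattern _
  unfold Spec_removeDupStars removeDupStars removeDupStars_alt
  rw [foldl_g, altRuns_g pattern.toList.length pattern.toList (le_refl _)]
  simp
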